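-- pv_equiv track=rewrite | github.com/MarisaJH/latin-pos-intertext-search | latin-embeddings-search/notebooks/intertext-search-bert.py | search_for_word
-- ===== SOURCE A (Python) =====
-- def search_for_word(word: str, word_tokens: list[list[str]]):
--     strip_que = not(word.endswith('que') and len(word) > 3)
--     strip_ne = not(word.endswith('ne') and len(word) > 2)
--
--     for i, line in enumerate(word_tokens):
--         for j, w in enumerate(line):
--             if strip_que and w.endswith('que') and len(w) > 3:
--                 stripped_word = w[:-3]
--                 if stripped_word == word:
--                     return i, j
--             elif strip_ne and w.endswith('ne') and len(w) > 2:
--                 stripped_word = w[:-2]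
--                 if stripped_word == word:
--                     return i, j
--             else:
--                 if w == word:
--                     return i, j
--     return -1, -1
-- ===== SOURCE B (Python) =====
-- def search_for_word(word: str, word_tokens: list[list[str]]):
--     strip_que = not (word.endswith('que') and len(word) > 3)
--     strip_ne = not (word.endswith('ne') and len(word) > 2)
--     forms = {word}
--     if strip_que and word:
--         forms.add(word + 'que')
--     if strip_ne and word:
--         forms.add(word + 'ne')
--     for i, line in enumerate(word_tokens):
--         for j, w in enumerate(line):
--             if w in forms:
--                 return i, j
--     return -1, -1
-- ===== Notes on version B (the rewrite author's own statement) =====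
-- stated objective: simpler
-- what changed: Instead of suffix-testing and slicing every token, B precomputes the set of at most three acceptable surface forms of the query (word, and word+'que' / word+'ne' when stripping is permitted) once, and the scan becomes a plain first-membership lookup.
import Mathlib
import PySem

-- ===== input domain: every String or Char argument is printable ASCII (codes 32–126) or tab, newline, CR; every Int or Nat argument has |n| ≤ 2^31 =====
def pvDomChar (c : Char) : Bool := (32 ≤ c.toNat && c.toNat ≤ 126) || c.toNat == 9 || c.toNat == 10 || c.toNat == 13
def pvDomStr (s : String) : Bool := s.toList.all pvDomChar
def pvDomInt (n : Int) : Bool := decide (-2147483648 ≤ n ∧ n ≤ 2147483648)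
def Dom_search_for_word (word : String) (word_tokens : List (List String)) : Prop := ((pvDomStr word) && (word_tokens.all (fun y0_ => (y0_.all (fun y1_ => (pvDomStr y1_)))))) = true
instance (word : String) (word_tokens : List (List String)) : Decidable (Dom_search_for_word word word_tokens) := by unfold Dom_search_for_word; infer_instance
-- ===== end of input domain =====

-- B replaces A's per-token suffix-branching-and-stripping by a once-built set of the
-- acceptable surface forms of the query plus a plain first-membership scan (objective: simpler).

-- ===== PORT A =====
-- inner 'for j, w in enumerate(line)' loop of A, early return of j
def swInner (sq sn : Bool) (word : String) : List String → Int → Option Int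
  | [], _ => none
  | w :: rest, j =>
    if sq && PySem.Str.endswith w "que" && decide (PySem.Str.len w > 3) then
      if PySem.Str.slice w none (some (-3)) == word then some j
      else swInner sq sn word rest (j + 1)
    else if sn && PySem.Str.endswith w "ne" && decide (PySem.Str.len w > 2) then
      if PySem.Str.slice w none (some (-2)) == word then some j
      else swInner sq sn word rest (j + 1)
    else
      if w == word then some j
      else swInner sq sn word rest (j + 1)

-- outer 'for i, line in enumerate(word_tokens)' loop of A
def swOuter (sq sn : Bool) (word : String) : List (List String) → Int → Int × Int
  | [], _ => (-1, -1)
  | line :: rest, i =>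
    match swInner sq sn word line 0 with
    | some j => (i, j)
    | none => swOuter sq sn word rest (i + 1)

def search_for_word (word : String) (word_tokens : List (List String)) : Int × Int :=
  swOuter (!(PySem.Str.endswith word "que" && decide (PySem.Str.len word > 3)))
          (!(PySem.Str.endswith word "ne" && decide (PySem.Str.len word > 2)))
          word word_tokens 0

-- ===== PORT B =====
-- the set 'forms' of Source B; strings handled as their char lists (Lean's String.append is kernel-opaque)
def altForms (word : String) : PySem.Set (List Char) :=
  let strip_que := !(PySem.Str.endswith word "que" && decide (PySem.Str.len word > 3))
  let strip_ne := !(PySem.Str.endswith word "ne" && decide (PySem.Str.len word > 2))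
  let forms := PySem.Set.ofList [word.toList]
  let forms := if strip_que && !(word == "") then PySem.Set.add forms (word.toList ++ ['q','u','e']) else forms
  if strip_ne && !(word == "") then PySem.Set.add forms (word.toList ++ ['n','e']) else forms

-- inner loop of B: first membership hit
def altInner (forms : PySem.Set (List Char)) : List String → Int → Option Int
  | [], _ => none
  | w :: rest, j => if w.toList ∈ forms then some j else altInner forms rest (j + 1)

-- outer loop of B
def altOuter (forms : PySem.Set (List Char)) : List (List String) → Int → Int × Int
  | [], _ => (-1, -1)
  | line :: rest, i =>
    match altInner forms line 0 with
    | some j => (i, j)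
    | none => altOuter forms rest (i + 1)

def search_for_word_alt (word : String) (word_tokens : List (List String)) : Int × Int :=
  altOuter (altForms word) word_tokens 0

-- ===== PRECONDITION & SPEC =====
def Spec_search_for_word (word : String) (word_tokens : List (List String)) (out : Int × Int) : Prop := out = search_for_word_alt word word_tokens
instance (word : String) (word_tokens : List (List String)) (out : Int × Int) : Decidable (Spec_search_for_word word word_tokens out) := by unfold Spec_search_for_word; infer_instance

-- ===== CLAIM (what is proved, stated in full; the proofs are below) =====
def Claim_equal_search_for_word : Prop := ∀ (word : String) (word_tokens : List (List String)), Dom_search_for_word word word_tokens → Spec_search_for_word word word_tokens (search_for_word word word_tokens)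

-- ===== LEMMAS AND PROOFS =====

theorem toList_que : "que".toList = ['q','u','e'] := by decide

theorem toList_ne : "ne".toList = ['n','e'] := by decide

theorem rev_clash (p L : List Char) (h : p ++ ['q','u','e'] = L ++ ['n','e']) : False := by
  have := congrArg List.reverse h
  simp [List.reverse_append] at this

theorem not_endswith_que_ne (L : List Char) :
    PySem.Chars.endswith (L ++ ['n','e']) ['q','u','e'] = false := by
  rw [Bool.eq_false_iff]
  intro h
  obtain ⟨p, hp⟩ := (PySem.Chars.endswith_iff _ _).mp h
  exact rev_clash p L hp

theorem not_endswith_ne_que (L : List Char) :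
    PySem.Chars.endswith (L ++ ['q','u','e']) ['n','e'] = false := by
  rw [Bool.eq_false_iff]
  intro h
  obtain ⟨p, hp⟩ := (PySem.Chars.endswith_iff _ _).mp h
  exact rev_clash L p hp.symm

theorem endswith_app (L s : List Char) : PySem.Chars.endswith (L ++ s) s = true :=
  (PySem.Chars.endswith_iff _ _).mpr ⟨L, rfl⟩

theorem slice_take3 (W : List Char) :
    PySem.Chars.slice W none (some (-3)) = W.take (W.length - 3) := by
  simp only [PySem.Chars.slice_eq_listSlice]
  rw [PySem.List.slice_to_neg_ofNat W 3 (by omega)]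

theorem slice_take2 (W : List Char) :
    PySem.Chars.slice W none (some (-2)) = W.take (W.length - 2) := by
  simp only [PySem.Chars.slice_eq_listSlice]
  rw [PySem.List.slice_to_neg_ofNat W 2 (by omega)]

theorem slice_beq (w word : String) (a b : Option Int) :
    (PySem.Str.slice w a b == word) = true ↔ PySem.Chars.slice w.toList a b = word.toList := by
  rw [beq_iff_eq, ← String.toList_inj]
  simp

theorem streq (w word : String) : (w == word) = true ↔ w.toList = word.toList := by
  simp [String.toList_inj]

-- the take-form of "w with suffix s stripped equals word"
theorem take_eq_iff {W L : List Char} (s : List Char) (h : s <:+ W) :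
    W.take (W.length - s.length) = L ↔ W = L ++ s := by
  obtain ⟨p, rfl⟩ := h
  have ht : (p ++ s).take ((p ++ s).length - s.length) = p := by simp
  rw [ht]
  constructor
  · rintro rfl; rfl
  · intro he
    have : p ++ s = L ++ s := he
    simpa using this

theorem take_eq_iff3 {W L : List Char} (h : ['q','u','e'] <:+ W) :
    W.take (W.length - 3) = L ↔ W = L ++ ['q','u','e'] := by
  have := take_eq_iff (W := W) (L := L) ['q','u','e'] h
  simpa using this

theorem take_eq_iff2 {W L : List Char} (h : ['n','e'] <:+ W) :
    W.take (W.length - 2) = L ↔ W = L ++ ['n','e'] := by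
  have := take_eq_iff (W := W) (L := L) ['n','e'] h
  simpa using this

-- membership in B's form set, spelt out
theorem mem_altForms (word : String) (W : List Char) :
    W ∈ altForms word ↔
      (W = word.toList
       ∨ ((PySem.Str.endswith word "que" && decide (PySem.Str.len word > 3)) = false
            ∧ word.toList ≠ [] ∧ W = word.toList ++ ['q','u','e'])
       ∨ ((PySem.Str.endswith word "ne" && decide (PySem.Str.len word > 2)) = false
            ∧ word.toList ≠ [] ∧ W = word.toList ++ ['n','e'])) := by
  unfold altForms
  cases hq : (PySem.Str.endswith word "que" && decide (PySem.Str.len word > 3))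
  <;> cases hn : (PySem.Str.endswith word "ne" && decide (PySem.Str.len word > 2))
  <;> by_cases he : word = ""
  <;> simp [he, PySem.Set.mem_ofList, String.toList_eq_nil_iff]

-- per-token: A's branch chain computes membership in B's form set
theorem hit_eq (word w : String) :
    (if !(PySem.Str.endswith word "que" && decide (PySem.Str.len word > 3)) && PySem.Str.endswith w "que" && decide (PySem.Str.len w > 3) then
       PySem.Str.slice w none (some (-3)) == word
     else if !(PySem.Str.endswith word "ne" && decide (PySem.Str.len word > 2)) && PySem.Str.endswith w "ne" && decide (PySem.Str.len w > 2) then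
       PySem.Str.slice w none (some (-2)) == word
     else w == word) = decide (w.toList ∈ altForms word) := by
  by_cases hc1 : (!(PySem.Str.endswith word "que" && decide (PySem.Str.len word > 3)) && PySem.Str.endswith w "que" && decide (PySem.Str.len w > 3)) = true
  · rw [if_pos hc1]
    obtain ⟨⟨hsq, hE⟩, hl⟩ : ((PySem.Str.endswith word "que" && decide (PySem.Str.len word > 3)) = false ∧ PySem.Str.endswith w "que" = true) ∧ PySem.Str.len w > 3 := by
      simpa only [Bool.and_eq_true, Bool.not_eq_true', decide_eq_true_eq] using hc1
    have hEc : PySem.Chars.endswith w.toList ['q','u','e'] = true := by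
      rw [PySem.Str.endswith_eq, toList_que] at hE; exact hE
    have hlc : 3 < w.toList.length := by simp only [PySem.Str.len_eq] at hl; exact_mod_cast hl
    have hsuf := (PySem.Chars.endswith_iff _ _).mp hEc
    by_cases hm : PySem.Chars.slice w.toList none (some (-3)) = word.toList
    · have hmt : (PySem.Str.slice w none (some (-3)) == word) = true := (slice_beq _ _ _ _).mpr hm
      rw [hmt]
      have hW : w.toList = word.toList ++ ['q','u','e'] := by
        rw [slice_take3] at hm
        exact (take_eq_iff3 hsuf).mp hm
      have hne : word.toList ≠ [] := by
        intro h0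
        rw [hW, h0] at hlc
        simp at hlc
      have hmem : w.toList ∈ altForms word :=
        (mem_altForms word _).mpr (Or.inr (Or.inl ⟨hsq, hne, hW⟩))
      simp [hmem]
    · have hmf : (PySem.Str.slice w none (some (-3)) == word) = false := by
        rw [Bool.eq_false_iff]; intro ht; exact hm ((slice_beq _ _ _ _).mp ht)
      rw [hmf]
      have hnm : ¬ w.toList ∈ altForms word := by
        rw [mem_altForms]
        rintro (hW | ⟨_, _, hW⟩ | ⟨_, _, hW⟩)
        · rw [hW] at hEc hlc
          have hx : (PySem.Str.endswith word "que" && decide (PySem.Str.len word > 3)) = true := by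
            simp only [PySem.Str.endswith_eq, toList_que, PySem.Str.len_eq,
              Bool.and_eq_true, decide_eq_true_eq]
            exact ⟨hEc, by exact_mod_cast hlc⟩
          rw [hx] at hsq; simp at hsq
        · apply hm
          rw [slice_take3, hW]
          simp
        · rw [hW, not_endswith_que_ne] at hEc
          simp at hEc
      simp [hnm]
  · rw [if_neg hc1]
    by_cases hc2 : (!(PySem.Str.endswith word "ne" && decide (PySem.Str.len word > 2)) && PySem.Str.endswith w "ne" && decide (PySem.Str.len w > 2)) = true
    · rw [if_pos hc2]
      obtain ⟨⟨hsn, hE⟩, hl⟩ : ((PySem.Str.endswith word "ne" && decide (PySem.Str.len word > 2)) = false ∧ PySem.Str.endswith w "ne" = true) ∧ PySem.Str.len w > 2 := by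
        simpa only [Bool.and_eq_true, Bool.not_eq_true', decide_eq_true_eq] using hc2
      have hEc : PySem.Chars.endswith w.toList ['n','e'] = true := by
        rw [PySem.Str.endswith_eq, toList_ne] at hE; exact hE
      have hlc : 2 < w.toList.length := by simp only [PySem.Str.len_eq] at hl; exact_mod_cast hl
      have hsuf := (PySem.Chars.endswith_iff _ _).mp hEc
      by_cases hm : PySem.Chars.slice w.toList none (some (-2)) = word.toList
      · have hmt : (PySem.Str.slice w none (some (-2)) == word) = true := (slice_beq _ _ _ _).mpr hm
        rw [hmt]
        have hW : w.toList = word.toList ++ ['n','e'] := by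
          rw [slice_take2] at hm
          exact (take_eq_iff2 hsuf).mp hm
        have hne : word.toList ≠ [] := by
          intro h0
          rw [hW, h0] at hlc
          simp at hlc
        have hmem : w.toList ∈ altForms word :=
          (mem_altForms word _).mpr (Or.inr (Or.inr ⟨hsn, hne, hW⟩))
        simp [hmem]
      · have hmf : (PySem.Str.slice w none (some (-2)) == word) = false := by
          rw [Bool.eq_false_iff]; intro ht; exact hm ((slice_beq _ _ _ _).mp ht)
        rw [hmf]
        have hnm : ¬ w.toList ∈ altForms word := by
          rw [mem_altForms]
          rintro (hW | ⟨_, _, hW⟩ | ⟨_, _, hW⟩)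
          · rw [hW] at hEc hlc
            have hx : (PySem.Str.endswith word "ne" && decide (PySem.Str.len word > 2)) = true := by
              simp only [PySem.Str.endswith_eq, toList_ne, PySem.Str.len_eq,
                Bool.and_eq_true, decide_eq_true_eq]
              exact ⟨hEc, by exact_mod_cast hlc⟩
            rw [hx] at hsn; simp at hsn
          · rw [hW, not_endswith_ne_que] at hEc
            simp at hEc
          · apply hm
            rw [slice_take2, hW]
            simp
        simp [hnm]
    · rw [if_neg hc2]
      by_cases hm : w.toList = word.toList
      · have hmt : (w == word) = true := (streq _ _).mpr hm
        rw [hmt]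
        have hmem : w.toList ∈ altForms word := (mem_altForms word _).mpr (Or.inl hm)
        simp [hmem]
      · have hmf : (w == word) = false := by
          rw [Bool.eq_false_iff]; intro ht; exact hm ((streq _ _).mp ht)
        rw [hmf]
        have hnm : ¬ w.toList ∈ altForms word := by
          rw [mem_altForms]
          rintro (hW | ⟨hq, hne, hW⟩ | ⟨hq, hne, hW⟩)
          · exact hm hW
          · apply hc1
            have h0 : 0 < word.toList.length := by
              cases hx : word.toList with
              | nil => exact absurd hx hne
              | cons a t => simp
            simp only [Bool.and_eq_true, Bool.not_eq_true', decide_eq_true_eq]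
            refine ⟨⟨hq, ?_⟩, ?_⟩
            · simp only [PySem.Str.endswith_eq, toList_que, hW]
              exact endswith_app _ _
            · simp only [PySem.Str.len_eq, hW, List.length_append,
                List.length_cons, List.length_nil]
              omega
          · apply hc2
            have h0 : 0 < word.toList.length := by
              cases hx : word.toList with
              | nil => exact absurd hx hne
              | cons a t => simp
            simp only [Bool.and_eq_true, Bool.not_eq_true', decide_eq_true_eq]
            refine ⟨⟨hq, ?_⟩, ?_⟩
            · simp only [PySem.Str.endswith_eq, toList_ne, hW]
              exact endswith_app _ _
            · simp only [PySem.Str.len_eq, hW, List.length_append,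
                List.length_cons, List.length_nil]
              omega
        simp [hnm]

theorem collapse {α : Type} (c1 c2 m1 m2 m0 : Bool) (x y : α) :
    (if c1 then (if m1 then x else y) else if c2 then (if m2 then x else y) else (if m0 then x else y))
    = (if (if c1 then m1 else if c2 then m2 else m0) then x else y) := by
  cases c1 <;> cases c2 <;> cases m1 <;> cases m2 <;> cases m0 <;> rfl

theorem inner_eq (word : String) (line : List String) (j : Int) :
    swInner (!(PySem.Str.endswith word "que" && decide (PySem.Str.len word > 3)))
            (!(PySem.Str.endswith word "ne" && decide (PySem.Str.len word > 2)))
            word line j = altInner (altForms word) line j := by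
  induction line generalizing j with
  | nil => rfl
  | cons w rest ih =>
    simp only [swInner, altInner, ih]
    rw [collapse, hit_eq]
    simp

theorem outer_eq (word : String) (wt : List (List String)) (i : Int) :
    swOuter (!(PySem.Str.endswith word "que" && decide (PySem.Str.len word > 3)))
            (!(PySem.Str.endswith word "ne" && decide (PySem.Str.len word > 2)))
            word wt i = altOuter (altForms word) wt i := by
  induction wt generalizing i with
  | nil => rfl
  | cons line rest ih =>
    simp only [swOuter, altOuter]
    rw [inner_eq]
    cases h : altInner (altForms word) line 0 with
    | none => exact ih (i + 1)
    | some j => rfl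

-- ===== VERDICT (by name: the statement is the Claim_ definition above) =====
theorem search_for_word_spec : Claim_equal_search_for_word := by
  intro word wt _
  unfold Spec_search_for_word search_for_word search_for_word_alt
  exact outer_eq word wt 0
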